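-- pv_equiv track=rewrite | github.com/oPisiti/Advent-Of-Code | 2023/13/13.py | check_middle
-- ===== SOURCE A (Python) =====
-- def check_middle(mirror: list[int], l: int, r: int) -> bool:
--     i_l, i_r = l, r
--
--     while i_l >= 0 and i_r < len(mirror):
--         if mirror[i_l] != mirror[i_r]:
--             return False
--
--         i_l -= 1
--         i_r += 1
--
--     return True
-- ===== SOURCE B (Python) =====
-- def check_middle(mirror: list[int], l: int, r: int) -> bool:
--     # compare the reversed left half with the right half in one list equality
--     n = min(l + 1, len(mirror) - r)
--     if n <= 0:
--         return True
--     return mirror[l - n + 1:l + 1][::-1] == mirror[r:r + n]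
-- ===== Notes on version B (the rewrite author's own statement) =====
-- stated objective: simpler
-- what changed: Replaced the expanding two-pointer while-loop with computing the overlap length n once and comparing the reversed left slice against the right slice in a single list equality.
-- outside the precondition, e.g. on check_middle([1, 2, 1], 0, -1): A returns True, B returns False; on check_middle([1, 2], 5, 0): A raises IndexError, B returns False
import Mathlib
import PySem

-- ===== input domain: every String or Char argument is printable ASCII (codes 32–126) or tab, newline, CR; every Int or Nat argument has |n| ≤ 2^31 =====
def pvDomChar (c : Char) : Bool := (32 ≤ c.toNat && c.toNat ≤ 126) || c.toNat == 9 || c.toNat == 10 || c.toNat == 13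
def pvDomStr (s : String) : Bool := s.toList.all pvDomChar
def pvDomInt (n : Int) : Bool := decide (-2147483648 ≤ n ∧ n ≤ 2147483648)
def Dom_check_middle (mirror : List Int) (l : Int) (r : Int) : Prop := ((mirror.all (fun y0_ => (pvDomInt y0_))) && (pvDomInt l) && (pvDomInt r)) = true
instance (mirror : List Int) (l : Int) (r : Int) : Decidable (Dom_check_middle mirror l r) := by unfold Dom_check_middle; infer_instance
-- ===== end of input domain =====

-- B replaces A's expanding two-pointer loop by computing the overlap length once and
-- comparing the reversed left slice with the right slice (objective: simpler).


-- ===== PORT A =====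
-- A's while-loop; indexing via pyGet? (the getD 0 default is never reached inside Pre_)
def check_middle_loop (mirror : List Int) (i_l : Int) (i_r : Int) : Bool :=
  if h : 0 ≤ i_l ∧ i_r < (mirror.length : Int) then
    if (PySem.List.pyGet? mirror i_l).getD 0 ≠ (PySem.List.pyGet? mirror i_r).getD 0 then
      false
    else
      check_middle_loop mirror (i_l - 1) (i_r + 1)
  else
    true
termination_by ((mirror.length : Int) - i_r).toNat
decreasing_by omega

def check_middle (mirror : List Int) (l : Int) (r : Int) : Bool :=
  check_middle_loop mirror l r

-- ===== PORT B =====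
def check_middle_alt (mirror : List Int) (l : Int) (r : Int) : Bool :=
  let n := min (l + 1) ((mirror.length : Int) - r)
  if n ≤ 0 then
    true
  else
    -- mirror[l-n+1:l+1][::-1] == mirror[r:r+n]  ([::-1] is slice? with step -1)
    ((PySem.List.slice? (PySem.List.slice mirror (some (l - n + 1)) (some (l + 1))) none none (-1)).getD []
      == PySem.List.slice mirror (some r) (some (r + n)))

-- ===== PRECONDITION & SPEC =====
-- Pre_ excludes inputs where A raises IndexError (l ≥ len(mirror) with r < len(mirror), or
-- r < -len(mirror) with 0 ≤ l), and the remaining negative-r inputs, on which A's element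
-- comparisons go through Python negative-index wraparound while B's slices clamp — an
-- unspecified corner (r is a split boundary) on which either value is defensible.
def Pre_check_middle (mirror : List Int) (l : Int) (r : Int) : Prop :=
  0 ≤ r ∧ (l < (mirror.length : Int) ∨ (mirror.length : Int) ≤ r)
instance (mirror : List Int) (l : Int) (r : Int) : Decidable (Pre_check_middle mirror l r) := by unfold Pre_check_middle; infer_instance

def pvWitness_check_middle : List Int × Int × Int := ([1, 2, 2, 1], 1, 2)

def Spec_check_middle (mirror : List Int) (l : Int) (r : Int) (out : Bool) : Prop := out = check_middle_alt mirror l r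
instance (mirror : List Int) (l : Int) (r : Int) (out : Bool) : Decidable (Spec_check_middle mirror l r out) := by unfold Spec_check_middle; infer_instance

-- ===== CLAIM (what is proved, stated in full; the proofs are below) =====
def Claim_equal_check_middle : Prop := ∀ (mirror : List Int) (l : Int) (r : Int), Dom_check_middle mirror l r → Pre_check_middle mirror l r → Spec_check_middle mirror l r (check_middle mirror l r)

-- ===== LEMMAS AND PROOFS =====

-- Nat-level form of B's comparison: the segment [li+1-nn, li+1) reversed vs the segment [ri, ri+nn)
def altN (m : List Int) (li ri nn : Nat) : Bool :=
  ((m.drop (li + 1 - nn)).take nn).reverse == (m.drop ri).take nn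

-- loop invariant: with nn the remaining overlap, each iteration peels one element off
-- the end of the left segment and the front of the right segment
theorem loopN (m : List Int) : ∀ (nn li ri : Nat), li < m.length →
    nn = min (li + 1) (m.length - ri) →
    check_middle_loop m (li : Int) (ri : Int) = altN m li ri nn := by
  intro nn
  induction nn with
  | zero =>
    intro li ri hli hnn
    have hri : m.length ≤ ri := by omega
    rw [check_middle_loop]
    simp only [altN, List.take_zero, List.reverse_nil]
    rw [dif_neg (by omega)]
    rfl
  | succ k ih =>
    intro li ri hli hnn
    have hri : ri < m.length := by omega
    have hk : k ≤ li := by omega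
    rw [check_middle_loop, dif_pos (by constructor <;> omega)]
    have hgl : (PySem.List.pyGet? m (li : Int)).getD 0 = m[li] := by
      simp [hli]
    have hgr : (PySem.List.pyGet? m (ri : Int)).getD 0 = m[ri] := by
      simp [hri]
    have hleft : (m.drop (li + 1 - (k+1))).take (k+1)
        = (m.drop (li - k)).take k ++ [m[li]] := by
      have h1 : li + 1 - (k+1) = li - k := by omega
      rw [h1, List.take_add_one]
      congr 1
      have h2 : (m.drop (li - k))[k]? = some m[li] := by
        rw [List.getElem?_drop]
        have h3 : li - k + k = li := by omega
        rw [h3, List.getElem?_eq_getElem hli]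
      simp [h2]
    have hright : (m.drop ri).take (k+1) = m[ri] :: (m.drop (ri+1)).take k := by
      rw [List.drop_eq_getElem_cons hri]
      rfl
    rw [hgl, hgr]
    by_cases he : m[li] = m[ri]
    · rw [if_neg (by simp [he])]
      rcases Nat.eq_zero_or_pos li with h0 | hpos
      · subst h0
        have hk0 : k = 0 := by omega
        subst hk0
        rw [check_middle_loop, dif_neg (by intro h; omega)]
        simp only [altN, hleft, hright]
        simp [he]
      · have harg : ((li : Int) - 1) = ((li - 1 : Nat) : Int) := by omega
        have harg2 : ((ri : Int) + 1) = ((ri + 1 : Nat) : Int) := by omega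
        rw [harg, harg2, ih (li - 1) (ri + 1) (by omega) (by omega)]
        simp only [altN, hleft, hright]
        have h3 : li - 1 + 1 - k = li - k := by omega
        rw [h3]
        simp [he]
    · rw [if_pos (by simp [he])]
      simp only [altN, hleft, hright]
      simp [he]

theorem check_middle_main (m : List Int) (l r : Int)
    (hr : 0 ≤ r) (hl : l < (m.length : Int)) :
    check_middle_loop m l r = check_middle_alt m l r := by
  by_cases hl0 : 0 ≤ l
  · by_cases hrl : (m.length : Int) ≤ r
    · rw [check_middle_loop, dif_neg (by omega)]
      simp only [check_middle_alt]
      rw [if_pos (by omega)]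
    · obtain ⟨li, rfl⟩ : ∃ li : Nat, l = (li : Int) := ⟨l.toNat, by omega⟩
      obtain ⟨ri, rfl⟩ : ∃ ri : Nat, r = (ri : Int) := ⟨r.toNat, by omega⟩
      have hlen : ri < m.length := by omega
      have hli : li < m.length := by omega
      set n : Int := min ((li : Int) + 1) ((m.length : Int) - (ri : Int)) with hn
      have hn1 : 1 ≤ n := by omega
      have hnle : n ≤ (li : Int) + 1 := by omega
      rw [loopN m n.toNat li ri hli (by omega)]
      simp only [check_middle_alt, ← hn]
      rw [if_neg (by omega)]
      rw [PySem.List.slice_toNat m (by omega) (by omega),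
          PySem.List.slice_toNat m (by omega) (by omega),
          PySem.List.slice?_none_none_neg_one]
      simp only [Option.getD_some, altN]
      have e1 : ((li : Int) - n + 1).toNat = li + 1 - n.toNat := by omega
      rw [e1]
      have e2 : ((li : Int) + 1).toNat - (li + 1 - n.toNat) = n.toNat := by omega
      have e3 : ((ri : Int) + n).toNat - ((ri : Int)).toNat = n.toNat := by omega
      have e4 : ((ri : Int)).toNat = ri := by omega
      rw [e2, e3, e4]
  · rw [check_middle_loop, dif_neg (by omega)]
    simp only [check_middle_alt]
    rw [if_pos (by omega)]

-- ===== VERDICT =====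
theorem check_middle_spec : Claim_equal_check_middle := by
  intro mirror l r _ hpre
  unfold Spec_check_middle check_middle
  rcases hpre with ⟨hr, hlr⟩
  rcases hlr with hl | hrl
  · exact check_middle_main mirror l r hr hl
  · rw [check_middle_loop, dif_neg (by omega)]
    simp only [check_middle_alt]
    rw [if_pos (by omega)]
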